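-- pv_equiv track=rewrite | github.com/grantp5/liminal-cosmopolitan | randomizer.py | check_same_quarter_repeats
-- ===== SOURCE A (Python) =====
-- def check_same_quarter_repeats(final_order_tu, final_order_b):
--     condition = 0
--     for x in range(len(final_order_tu)-15):
--         tu = final_order_tu[x]
--         b_position = final_order_b.index(tu)
--         if b_position <= 4:
--             condition += 1
--     for x in range(len(final_order_tu)-15):
--         tu = final_order_tu[x+5]
--         b_position = final_order_b.index(tu)
--         if b_position >= 5 and b_position <=9:
--             condition += 1
--     for x in range(len(final_order_tu)-15):
--         tu = final_order_tu[x+10]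
--         b_position = final_order_b.index(tu)
--         if b_position >= 10 and b_position <= 14:
--             condition += 1
--     for x in range(len(final_order_tu)-15):
--         tu = final_order_tu[x+15]
--         b_position = final_order_b.index(tu)
--         if b_position >= 15:
--             condition += 1
--     if condition == 0:
--         return False
--     else:
--         return True
-- ===== SOURCE B (Python) =====
-- def check_same_quarter_repeats(final_order_tu, final_order_b):
--     n = len(final_order_tu) - 15
--     if n <= 0:
--         return False
--     tu, b = final_order_tu, final_order_b
--     hit0 = set(tu[0:n]) & set(b[0:5])
--     hit1 = (set(tu[5:5 + n]) & set(b[5:10])) - set(b[0:5])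
--     hit2 = (set(tu[10:10 + n]) & set(b[10:15])) - set(b[0:10])
--     hit3 = (set(tu[15:]) & set(b[15:])) - set(b[0:15])
--     return bool(hit0 or hit1 or hit2 or hit3)
-- ===== Notes on version B (the rewrite author's own statement) =====
-- stated objective: idiomatic
-- what changed: Replaced A's four counting loops, each calling final_order_b.index (a linear scan) per element, by building sets from slices once and testing the four block intersections/differences for non-emptiness.
import Mathlib
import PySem

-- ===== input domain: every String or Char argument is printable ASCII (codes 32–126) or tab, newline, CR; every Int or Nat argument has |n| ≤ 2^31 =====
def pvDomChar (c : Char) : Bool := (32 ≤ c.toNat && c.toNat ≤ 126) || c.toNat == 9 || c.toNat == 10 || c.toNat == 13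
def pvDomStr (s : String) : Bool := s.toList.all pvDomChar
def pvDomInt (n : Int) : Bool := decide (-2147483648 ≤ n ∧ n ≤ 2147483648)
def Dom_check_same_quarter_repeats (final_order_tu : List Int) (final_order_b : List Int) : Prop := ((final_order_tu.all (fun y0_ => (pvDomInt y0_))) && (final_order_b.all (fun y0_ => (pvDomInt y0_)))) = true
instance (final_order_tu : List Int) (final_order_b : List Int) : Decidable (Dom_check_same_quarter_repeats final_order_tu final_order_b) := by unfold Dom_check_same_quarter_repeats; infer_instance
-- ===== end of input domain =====

-- B replaces A's four counting loops (each doing a linear final_order_b.index scan per element)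
-- by slice-based set intersections/differences; equivalence of RETURN VALUES is proved on Pre_.

-- ===== PORT A =====
def check_same_quarter_repeats (final_order_tu : List Int) (final_order_b : List Int) : Bool :=
  let condition : Int := 0
  -- for x in range(len(final_order_tu)-15): first loop, block [0..4]
  let condition := (PySem.List.pyRange 0 ((final_order_tu.length : Int) - 15)).foldl
    (fun c x =>
      match PySem.List.pyGet? final_order_tu x with
      | some tuv =>
        match PySem.List.index? final_order_b tuv with
        | some bpos => if bpos ≤ 4 then c + 1 else c
        | none => c      -- Python raises ValueError here; such inputs are outside Pre_
      | none => c) condition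
  -- second loop, block [5..9]
  let condition := (PySem.List.pyRange 0 ((final_order_tu.length : Int) - 15)).foldl
    (fun c x =>
      match PySem.List.pyGet? final_order_tu (x + 5) with
      | some tuv =>
        match PySem.List.index? final_order_b tuv with
        | some bpos => if 5 ≤ bpos ∧ bpos ≤ 9 then c + 1 else c
        | none => c
      | none => c) condition
  -- third loop, block [10..14]
  let condition := (PySem.List.pyRange 0 ((final_order_tu.length : Int) - 15)).foldl
    (fun c x =>
      match PySem.List.pyGet? final_order_tu (x + 10) with
      | some tuv =>
        match PySem.List.index? final_order_b tuv with
        | some bpos => if 10 ≤ bpos ∧ bpos ≤ 14 then c + 1 else c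
        | none => c
      | none => c) condition
  -- fourth loop, block [15..]
  let condition := (PySem.List.pyRange 0 ((final_order_tu.length : Int) - 15)).foldl
    (fun c x =>
      match PySem.List.pyGet? final_order_tu (x + 15) with
      | some tuv =>
        match PySem.List.index? final_order_b tuv with
        | some bpos => if 15 ≤ bpos then c + 1 else c
        | none => c
      | none => c) condition
  if condition == 0 then false else true

-- ===== PORT B =====
def check_same_quarter_repeats_alt (final_order_tu : List Int) (final_order_b : List Int) : Bool :=
  let tu := final_order_tu
  let b := final_order_b
  let n : Int := (tu.length : Int) - 15
  if n ≤ 0 then false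
  else
    let hit0 := PySem.Set.inter (PySem.Set.ofList (PySem.List.slice tu (some 0) (some n)))
                  (PySem.Set.ofList (PySem.List.slice b (some 0) (some 5)))
    let hit1 := PySem.Set.diff
                  (PySem.Set.inter (PySem.Set.ofList (PySem.List.slice tu (some 5) (some (5 + n))))
                    (PySem.Set.ofList (PySem.List.slice b (some 5) (some 10))))
                  (PySem.Set.ofList (PySem.List.slice b (some 0) (some 5)))
    let hit2 := PySem.Set.diff
                  (PySem.Set.inter (PySem.Set.ofList (PySem.List.slice tu (some 10) (some (10 + n))))
                    (PySem.Set.ofList (PySem.List.slice b (some 10) (some 15))))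
                  (PySem.Set.ofList (PySem.List.slice b (some 0) (some 10)))
    let hit3 := PySem.Set.diff
                  (PySem.Set.inter (PySem.Set.ofList (PySem.List.slice tu (some 15) none))
                    (PySem.Set.ofList (PySem.List.slice b (some 15) none)))
                  (PySem.Set.ofList (PySem.List.slice b (some 0) (some 15)))
    !(hit0.isEmpty && hit1.isEmpty && hit2.isEmpty && hit3.isEmpty)

-- ===== PRECONDITION & SPEC =====
-- Pre_ excludes exactly the inputs where Python A raises ValueError: some element of
-- final_order_tu that one of the four loops passes to final_order_b.index is absent from final_order_b.
def Pre_check_same_quarter_repeats (final_order_tu : List Int) (final_order_b : List Int) : Prop :=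
  ∀ v ∈ (final_order_tu.take (final_order_tu.length - 15)
          ++ (final_order_tu.drop 5).take (final_order_tu.length - 15)
          ++ (final_order_tu.drop 10).take (final_order_tu.length - 15)
          ++ final_order_tu.drop 15), v ∈ final_order_b
instance (final_order_tu : List Int) (final_order_b : List Int) : Decidable (Pre_check_same_quarter_repeats final_order_tu final_order_b) := by unfold Pre_check_same_quarter_repeats; infer_instance

def pvWitness_check_same_quarter_repeats : List Int × List Int :=
  ([1, 2, 3, 4, 5, 6, 7, 8, 9, 10, 11, 12, 13, 14, 15, 16, 1],
   [1, 16, 2, 3, 4, 5, 6, 7, 8, 9, 10, 11, 12, 13, 14, 15])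

def Spec_check_same_quarter_repeats (final_order_tu : List Int) (final_order_b : List Int) (out : Bool) : Prop := out = check_same_quarter_repeats_alt final_order_tu final_order_b
instance (final_order_tu : List Int) (final_order_b : List Int) (out : Bool) : Decidable (Spec_check_same_quarter_repeats final_order_tu final_order_b out) := by unfold Spec_check_same_quarter_repeats; infer_instance

-- ===== CLAIM (what is proved, stated in full; the proofs are below) =====
def Claim_equal_check_same_quarter_repeats : Prop := ∀ (final_order_tu : List Int) (final_order_b : List Int), Dom_check_same_quarter_repeats final_order_tu final_order_b → Pre_check_same_quarter_repeats final_order_tu final_order_b → Spec_check_same_quarter_repeats final_order_tu final_order_b (check_same_quarter_repeats final_order_tu final_order_b)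

-- ===== LEMMAS AND PROOFS =====

-- The loop-body predicate of A's loops: the element at index x + d of tu has its first
-- occurrence in b at a position passing `test` (false where Python would raise).
def qPred (tu b : List Int) (d : Int) (test : Nat → Bool) (x : Int) : Bool :=
  match PySem.List.pyGet? tu (x + d) with
  | some v =>
    match PySem.List.index? b v with
    | some i => test i
    | none => false
  | none => false

-- first-occurrence index below k ↔ membership in the first k elements
lemma index_lt_iff {b : List Int} {v : Int} {i : Nat}
    (h : PySem.List.index? b v = some i) (k : Nat) : i < k ↔ v ∈ b.take k := by
  rw [PySem.List.index?_eq_some_iff] at h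
  obtain ⟨pre, suf, rfl, rfl, hnp⟩ := h
  constructor
  · intro hk
    rw [List.take_append]
    refine List.mem_append.mpr (Or.inr ?_)
    cases hk' : k - pre.length with
    | zero => omega
    | succ t => simp [List.take_succ_cons]
  · intro hv
    by_contra hk
    push_neg at hk
    rw [List.take_append] at hv
    have h0 : k - pre.length = 0 := by omega
    rw [h0] at hv
    simp only [List.take_zero, List.append_nil] at hv
    exact hnp (List.mem_of_mem_take hv)

lemma index_lt_len {b : List Int} {v : Int} {i : Nat}
    (h : PySem.List.index? b v = some i) : i < b.length :=
  (PySem.List.getElem_of_index?_eq_some h).elim (fun hk _ => hk)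

-- the window b[lo:hi] as "in the first hi, not in the first lo"
lemma take_window {b : List Int} {v : Int} {lo hi : Nat} :
    (v ∈ b.take hi ∧ v ∉ b.take lo) ↔ (v ∈ (b.drop lo).take (hi - lo) ∧ v ∉ b.take lo) := by
  by_cases h : lo ≤ hi
  · have hdec : b.take hi = b.take lo ++ (b.drop lo).take (hi - lo) := by
      rw [← List.take_add]; congr 1; omega
    rw [hdec]
    simp only [List.mem_append]
    tauto
  · have h1 : hi - lo = 0 := by omega
    rw [h1]
    simp only [List.take_zero, List.not_mem_nil, false_and, iff_false, not_and]
    intro hin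
    have hsub : b.take hi = (b.take lo).take hi := by rw [List.take_take]; congr 1; omega
    rw [hsub] at hin
    intro hout
    exact hout (List.mem_of_mem_take hin)

-- A's loop with offset off finds a hit ↔ some element of tu[off:off+m] lies in the window b[lo:hi]
-- and not in the prefix b[:lo]
lemma exists_q_iff (tu b : List Int) (off m lo hi : Nat) (test : Nat → Bool)
    (hoff : off + m ≤ tu.length)
    (htest : ∀ i, i < b.length → (test i = true ↔ (lo ≤ i ∧ i < hi))) :
    (∃ x ∈ PySem.List.pyRange 0 (m : Int), qPred tu b (off : Int) test x = true)
    ↔ ∃ v, v ∈ (tu.drop off).take m ∧ v ∈ (b.drop lo).take (hi - lo) ∧ v ∉ b.take lo := by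
  constructor
  · rintro ⟨x, hxmem, hq⟩
    rw [PySem.List.mem_pyRange_one] at hxmem
    obtain ⟨hx0, hxm⟩ := hxmem
    obtain ⟨j, rfl⟩ : ∃ j : Nat, x = (j : Int) := ⟨x.toNat, (Int.toNat_of_nonneg hx0).symm⟩
    have hjm : j < m := by exact_mod_cast hxm
    have hjoff : j + off < tu.length := by omega
    unfold qPred at hq
    rw [show ((j : Int) + (off : Int)) = ((j + off : Nat) : Int) by push_cast; ring,
        PySem.List.pyGet?_natCast, List.getElem?_eq_getElem hjoff] at hq
    cases hidx : PySem.List.index? b (tu[j + off]'hjoff) with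
    | none => simp only [hidx] at hq; exact absurd hq (by simp)
    | some i =>
      simp only [hidx] at hq
      have hil : i < b.length := index_lt_len hidx
      obtain ⟨hlo, hhi⟩ := (htest i hil).mp hq
      have hvhi : tu[j + off]'hjoff ∈ b.take hi := (index_lt_iff hidx hi).mp hhi
      have hvlo : tu[j + off]'hjoff ∉ b.take lo := fun hc => by
        have := (index_lt_iff hidx lo).mpr hc; omega
      refine ⟨tu[j + off]'hjoff, ?_, take_window.mp ⟨hvhi, hvlo⟩⟩
      rw [List.mem_iff_getElem]
      refine ⟨j, by simp only [List.length_take, List.length_drop]; omega, ?_⟩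
      rw [List.getElem_take, List.getElem_drop]
      congr 1
      omega
  · rintro ⟨v, hvtu, hvwin, hvlo⟩
    have hvhi : v ∈ b.take hi := (take_window.mpr ⟨hvwin, hvlo⟩).1
    have hvb : v ∈ b := List.mem_of_mem_take hvhi
    obtain ⟨i, hidx⟩ : ∃ i, PySem.List.index? b v = some i :=
      Option.isSome_iff_exists.mp ((PySem.List.index?_isSome_iff b v).mpr hvb)
    have hil : i < b.length := index_lt_len hidx
    have hhi : i < hi := (index_lt_iff hidx hi).mpr hvhi
    have hlo : lo ≤ i := by
      by_contra hc
      exact hvlo ((index_lt_iff hidx lo).mp (by omega))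
    rw [List.mem_iff_getElem] at hvtu
    obtain ⟨j, hjlen, hjv⟩ := hvtu
    have hjm : j < m := by simp only [List.length_take, List.length_drop] at hjlen; omega
    have hjoff : j + off < tu.length := by omega
    refine ⟨(j : Int), PySem.List.mem_pyRange_one.mpr
      ⟨Int.natCast_nonneg j, by exact_mod_cast hjm⟩, ?_⟩
    unfold qPred
    rw [show ((j : Int) + (off : Int)) = ((j + off : Nat) : Int) by push_cast; ring,
        PySem.List.pyGet?_natCast, List.getElem?_eq_getElem hjoff]
    have hvj : tu[j + off]'hjoff = v := by
      rw [← hjv, List.getElem_take, List.getElem_drop]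
      congr 1
      omega
    simp only [hvj, hidx]
    exact (htest i hil).mpr ⟨hlo, hhi⟩

-- body of A's loops rewritten as a counting ite over qPred
lemma body_eq (tu b : List Int) (d : Int) (test : Nat → Bool)
    (P : Nat → Prop) [inst : DecidablePred P] (hPt : ∀ i, test i = decide (P i)) :
    (fun (c x : Int) =>
      match PySem.List.pyGet? tu (x + d) with
      | some tuv =>
        match PySem.List.index? b tuv with
        | some bpos => if P bpos then c + 1 else c
        | none => c
      | none => c)
    = (fun c x => if qPred tu b d test x then c + 1 else c) := by
  funext c x
  unfold qPred
  cases PySem.List.pyGet? tu (x + d) with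
  | none => simp
  | some v =>
    cases hidx : PySem.List.index? b v with
    | none => rw [PySem.List.index?_eq_idxOf?] at hidx; simp [hidx]
    | some i =>
      rw [PySem.List.index?_eq_idxOf?] at hidx
      by_cases h : P i <;> simp [hidx, h, hPt i]

-- ===== VERDICT (by name: the statement is the Claim_ definition above) =====
theorem check_same_quarter_repeats_spec : Claim_equal_check_same_quarter_repeats := by
  intro tu b hdom hpre
  unfold Spec_check_same_quarter_repeats
  simp only [check_same_quarter_repeats, check_same_quarter_repeats_alt]
  by_cases hL : (tu.length : Int) - 15 ≤ 0
  · rw [PySem.List.pyRange_one_eq_nil hL]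
    simp [hL]
  · push_neg at hL
    have hL15 : 15 < tu.length := by omega
    set m : Nat := tu.length - 15 with hm
    have hLm : ((tu.length : Int) - 15) = (m : Int) := by omega
    have hmpos : ¬ ((m : Int) ≤ 0) := by omega
    rw [hLm, if_neg hmpos]
    -- rewrite the four loop bodies into counting form
    have hb1 := body_eq tu b 0 (fun i => decide (i ≤ 4)) (fun i => i ≤ 4) (fun i => rfl)
    have hb2 := body_eq tu b 5 (fun i => decide (5 ≤ i ∧ i ≤ 9)) (fun i => 5 ≤ i ∧ i ≤ 9) (fun i => rfl)
    have hb3 := body_eq tu b 10 (fun i => decide (10 ≤ i ∧ i ≤ 14)) (fun i => 10 ≤ i ∧ i ≤ 14) (fun i => rfl)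
    have hb4 := body_eq tu b 15 (fun i => decide (15 ≤ i)) (fun i => 15 ≤ i) (fun i => rfl)
    simp only [add_zero] at hb1
    rw [hb1, hb2, hb3, hb4]
    simp only [PySem.List.foldl_count_if]
    -- slices as drop/take
    have s_tu0 : PySem.List.slice tu (some 0) (some (m : Int)) = tu.take m := by
      rw [PySem.List.slice_toNat tu (by norm_num) (by positivity)]; simp
    have s_tu5 : PySem.List.slice tu (some 5) (some (5 + (m : Int))) = (tu.drop 5).take m := by
      rw [PySem.List.slice_toNat tu (by norm_num) (by positivity)]
      have h5 : ((5 : Int) + (m : Int)).toNat = 5 + m := by omega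
      simp [h5]
    have s_tu10 : PySem.List.slice tu (some 10) (some (10 + (m : Int))) = (tu.drop 10).take m := by
      rw [PySem.List.slice_toNat tu (by norm_num) (by positivity)]
      have h10 : ((10 : Int) + (m : Int)).toNat = 10 + m := by omega
      simp [h10]
    have s_tu15 : PySem.List.slice tu (some 15) none = tu.drop 15 := by
      rw [PySem.List.slice_from tu (by norm_num)]; simp
    have s_b05 : PySem.List.slice b (some 0) (some 5) = b.take 5 := by
      rw [PySem.List.slice_toNat b (by norm_num) (by norm_num)]; simp
    have s_b510 : PySem.List.slice b (some 5) (some 10) = (b.drop 5).take 5 := by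
      rw [PySem.List.slice_toNat b (by norm_num) (by norm_num)]; simp
    have s_b1015 : PySem.List.slice b (some 10) (some 15) = (b.drop 10).take 5 := by
      rw [PySem.List.slice_toNat b (by norm_num) (by norm_num)]; simp
    have s_b15 : PySem.List.slice b (some 15) none = b.drop 15 := by
      rw [PySem.List.slice_from b (by norm_num)]; simp
    have s_b010 : PySem.List.slice b (some 0) (some 10) = b.take 10 := by
      rw [PySem.List.slice_toNat b (by norm_num) (by norm_num)]; simp
    have s_b015 : PySem.List.slice b (some 0) (some 15) = b.take 15 := by
      rw [PySem.List.slice_toNat b (by norm_num) (by norm_num)]; simp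
    rw [s_tu0, s_tu5, s_tu10, s_tu15, s_b05, s_b510, s_b1015, s_b15, s_b010, s_b015]
    -- the four block equivalences
    have K1 := exists_q_iff tu b 0 m 0 5 (fun i => decide (i ≤ 4)) (by omega)
      (by intro i hi; simp; omega)
    have K2 := exists_q_iff tu b 5 m 5 10 (fun i => decide (5 ≤ i ∧ i ≤ 9)) (by omega)
      (by intro i hi; simp; omega)
    have K3 := exists_q_iff tu b 10 m 10 15 (fun i => decide (10 ≤ i ∧ i ≤ 14)) (by omega)
      (by intro i hi; simp; omega)
    have K4 := exists_q_iff tu b 15 m 15 b.length (fun i => decide (15 ≤ i)) (by omega)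
      (by intro i hi; simp; omega)
    simp only [Nat.cast_ofNat, Nat.cast_zero, List.drop_zero, List.take_zero,
      List.not_mem_nil, not_false_eq_true, and_true, Nat.sub_zero] at K1 K2 K3 K4
    have hwin4 : (b.drop 15).take (b.length - 15) = b.drop 15 :=
      List.take_of_length_le (by simp)
    rw [hwin4] at K4
    have htu15 : (tu.drop 15).take m = tu.drop 15 :=
      List.take_of_length_le (by simp [List.length_drop]; omega)
    rw [htu15] at K4
    have h55 : 10 - 5 = 5 := by omega
    have h1510 : 15 - 10 = 5 := by omega
    rw [h55] at K2
    rw [h1510] at K3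
    -- countP nonzero gives an existing hit
    have ne_of : ∀ (p : Int → Bool), List.countP p (PySem.List.pyRange 0 (m : Int)) ≠ 0 →
        ∃ x ∈ PySem.List.pyRange 0 (m : Int), p x = true := by
      intro p hp
      by_contra hc
      push_neg at hc
      exact hp (List.countP_eq_zero.mpr (by intro a ha; simp [hc a ha]))
    simp only [beq_iff_eq]
    split_ifs with hz
    · -- all counts zero: every hit list is empty
      have z1 : List.countP (qPred tu b 0 (fun i => decide (i ≤ 4))) (PySem.List.pyRange 0 (m : Int)) = 0 := by omega
      have z2 : List.countP (qPred tu b 5 (fun i => decide (5 ≤ i ∧ i ≤ 9))) (PySem.List.pyRange 0 (m : Int)) = 0 := by omega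
      have z3 : List.countP (qPred tu b 10 (fun i => decide (10 ≤ i ∧ i ≤ 14))) (PySem.List.pyRange 0 (m : Int)) = 0 := by omega
      have z4 : List.countP (qPred tu b 15 (fun i => decide (15 ≤ i))) (PySem.List.pyRange 0 (m : Int)) = 0 := by omega
      have l1 := List.countP_eq_zero.mp z1
      have l2 := List.countP_eq_zero.mp z2
      have l3 := List.countP_eq_zero.mp z3
      have l4 := List.countP_eq_zero.mp z4
      have e1 : ∀ v, v ∉ PySem.Set.inter (PySem.Set.ofList (tu.take m)) (PySem.Set.ofList (b.take 5)) := by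
        intro v hv
        obtain ⟨x, hx, hq⟩ := K1.mpr ⟨v, by
          simp only [PySem.Set.mem_inter, PySem.Set.mem_ofList] at hv
          exact hv⟩
        exact l1 x hx hq
      have e2 : ∀ v, v ∉ PySem.Set.diff
          (PySem.Set.inter (PySem.Set.ofList ((tu.drop 5).take m)) (PySem.Set.ofList ((b.drop 5).take 5)))
          (PySem.Set.ofList (b.take 5)) := by
        intro v hv
        obtain ⟨x, hx, hq⟩ := K2.mpr ⟨v, by
          simp only [PySem.Set.mem_diff, PySem.Set.mem_inter, PySem.Set.mem_ofList] at hv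
          exact ⟨hv.1.1, hv.1.2, hv.2⟩⟩
        exact l2 x hx hq
      have e3 : ∀ v, v ∉ PySem.Set.diff
          (PySem.Set.inter (PySem.Set.ofList ((tu.drop 10).take m)) (PySem.Set.ofList ((b.drop 10).take 5)))
          (PySem.Set.ofList (b.take 10)) := by
        intro v hv
        obtain ⟨x, hx, hq⟩ := K3.mpr ⟨v, by
          simp only [PySem.Set.mem_diff, PySem.Set.mem_inter, PySem.Set.mem_ofList] at hv
          exact ⟨hv.1.1, hv.1.2, hv.2⟩⟩
        exact l3 x hx hq
      have e4 : ∀ v, v ∉ PySem.Set.diff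
          (PySem.Set.inter (PySem.Set.ofList (tu.drop 15)) (PySem.Set.ofList (b.drop 15)))
          (PySem.Set.ofList (b.take 15)) := by
        intro v hv
        obtain ⟨x, hx, hq⟩ := K4.mpr ⟨v, by
          simp only [PySem.Set.mem_diff, PySem.Set.mem_inter, PySem.Set.mem_ofList] at hv
          exact ⟨hv.1.1, hv.1.2, hv.2⟩⟩
        exact l4 x hx hq
      rw [List.eq_nil_iff_forall_not_mem.mpr e1, List.eq_nil_iff_forall_not_mem.mpr e2,
          List.eq_nil_iff_forall_not_mem.mpr e3, List.eq_nil_iff_forall_not_mem.mpr e4]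
      simp
    · -- some count is nonzero: the corresponding hit list is nonempty
      have hcase : List.countP (qPred tu b 0 (fun i => decide (i ≤ 4))) (PySem.List.pyRange 0 (m : Int)) ≠ 0 ∨
          List.countP (qPred tu b 5 (fun i => decide (5 ≤ i ∧ i ≤ 9))) (PySem.List.pyRange 0 (m : Int)) ≠ 0 ∨
          List.countP (qPred tu b 10 (fun i => decide (10 ≤ i ∧ i ≤ 14))) (PySem.List.pyRange 0 (m : Int)) ≠ 0 ∨
          List.countP (qPred tu b 15 (fun i => decide (15 ≤ i))) (PySem.List.pyRange 0 (m : Int)) ≠ 0 := by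
        omega
      rcases hcase with hk | hk | hk | hk
      · obtain ⟨v, hv1, hv2⟩ := K1.mp (ne_of _ hk)
        have hmem : v ∈ PySem.Set.inter (PySem.Set.ofList (tu.take m)) (PySem.Set.ofList (b.take 5)) := by
          simp only [PySem.Set.mem_inter, PySem.Set.mem_ofList]
          exact ⟨hv1, hv2⟩
        have hne : PySem.Set.inter (PySem.Set.ofList (tu.take m)) (PySem.Set.ofList (b.take 5)) ≠ [] := by
          intro h0; rw [h0] at hmem; simp at hmem
        simp [List.isEmpty_iff, hne]
      · obtain ⟨v, hv1, hv2, hv3⟩ := K2.mp (ne_of _ hk)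
        have hmem : v ∈ PySem.Set.diff
            (PySem.Set.inter (PySem.Set.ofList ((tu.drop 5).take m)) (PySem.Set.ofList ((b.drop 5).take 5)))
            (PySem.Set.ofList (b.take 5)) := by
          simp only [PySem.Set.mem_diff, PySem.Set.mem_inter, PySem.Set.mem_ofList]
          exact ⟨⟨hv1, hv2⟩, hv3⟩
        have hne : PySem.Set.diff
            (PySem.Set.inter (PySem.Set.ofList ((tu.drop 5).take m)) (PySem.Set.ofList ((b.drop 5).take 5)))
            (PySem.Set.ofList (b.take 5)) ≠ [] := by
          intro h0; rw [h0] at hmem; simp at hmem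
        simp [List.isEmpty_iff, hne]
      · obtain ⟨v, hv1, hv2, hv3⟩ := K3.mp (ne_of _ hk)
        have hmem : v ∈ PySem.Set.diff
            (PySem.Set.inter (PySem.Set.ofList ((tu.drop 10).take m)) (PySem.Set.ofList ((b.drop 10).take 5)))
            (PySem.Set.ofList (b.take 10)) := by
          simp only [PySem.Set.mem_diff, PySem.Set.mem_inter, PySem.Set.mem_ofList]
          exact ⟨⟨hv1, hv2⟩, hv3⟩
        have hne : PySem.Set.diff
            (PySem.Set.inter (PySem.Set.ofList ((tu.drop 10).take m)) (PySem.Set.ofList ((b.drop 10).take 5)))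
            (PySem.Set.ofList (b.take 10)) ≠ [] := by
          intro h0; rw [h0] at hmem; simp at hmem
        simp [List.isEmpty_iff, hne]
      · obtain ⟨v, hv1, hv2, hv3⟩ := K4.mp (ne_of _ hk)
        have hmem : v ∈ PySem.Set.diff
            (PySem.Set.inter (PySem.Set.ofList (tu.drop 15)) (PySem.Set.ofList (b.drop 15)))
            (PySem.Set.ofList (b.take 15)) := by
          simp only [PySem.Set.mem_diff, PySem.Set.mem_inter, PySem.Set.mem_ofList]
          exact ⟨⟨hv1, hv2⟩, hv3⟩
        have hne : PySem.Set.diff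
            (PySem.Set.inter (PySem.Set.ofList (tu.drop 15)) (PySem.Set.ofList (b.drop 15)))
            (PySem.Set.ofList (b.take 15)) ≠ [] := by
          intro h0; rw [h0] at hmem; simp at hmem
        simp [List.isEmpty_iff, hne]
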